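-- pv_equiv track=rewrite | github.com/pradhyumk/VirusTotal-File-Scan-Bot | VirusTotalAVBot/modules/virustotal.py | detailedview
-- ===== SOURCE A (Python) =====
-- def detailedview(av_data: dict, filehash: str) -> str:
--     """Builds and returns a string containing detailed information regarding the analysis for each antivirus engine"""
--     vt_url = f'https://www.virustotal.com/gui/file/{filehash}'
--     response = f"__VirusTotal Analysis Summary__:\n\nHash: `{filehash}`\n\nLink: [Click Here]({vt_url})\n\n"
--
--     for engine in av_data:
--         if av_data[engine]['category'] == 'malicious' or av_data[engine]['category'] == 'suspicious':
--             response = response + f"❌ **{av_data[engine]['engine_name']}: {av_data[engine]['result']}**\n"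
--
--     for engine in av_data:
--         if av_data[engine]['category'] == 'undetected':
--             response = response + f"✅ {av_data[engine]['engine_name']}: Undetected\n"
--
--     for engine in av_data:
--         if av_data[engine]['category'] == 'timeout' or av_data[engine]['category'] == 'type-unsupported' \
--                 or av_data[engine]['category'] == 'failure':
--             response = response + f"⚠ {av_data[engine]['engine_name']}: Unsupported File\n"
--
--     return response
-- ===== SOURCE B (Python) =====
-- def detailedview(av_data: dict, filehash: str) -> str:
--     """Single pass: bucket each engine's line by category, then emit header + buckets."""
--     malicious_lines, undetected_lines, unsupported_lines = [], [], []
--     for engine, info in av_data.items():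
--         cat = info['category']
--         if cat in ('malicious', 'suspicious'):
--             malicious_lines.append(f"\u274c **{info['engine_name']}: {info['result']}**\n")
--         elif cat == 'undetected':
--             undetected_lines.append(f"\u2705 {info['engine_name']}: Undetected\n")
--         elif cat in ('timeout', 'type-unsupported', 'failure'):
--             unsupported_lines.append(f"\u26a0 {info['engine_name']}: Unsupported File\n")
--     vt_url = f'https://www.virustotal.com/gui/file/{filehash}'
--     header = f"__VirusTotal Analysis Summary__:\n\nHash: `{filehash}`\n\nLink: [Click Here]({vt_url})\n\n"
--     return header + ''.join(malicious_lines + undetected_lines + unsupported_lines)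
-- ===== Notes on version B (the rewrite author's own statement) =====
-- stated objective: alternative
-- what changed: Replaces A's three full scans over av_data by a single pass that buckets each engine's formatted line into malicious/undetected/unsupported lists, then emits header plus the joined buckets.
import Mathlib
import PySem

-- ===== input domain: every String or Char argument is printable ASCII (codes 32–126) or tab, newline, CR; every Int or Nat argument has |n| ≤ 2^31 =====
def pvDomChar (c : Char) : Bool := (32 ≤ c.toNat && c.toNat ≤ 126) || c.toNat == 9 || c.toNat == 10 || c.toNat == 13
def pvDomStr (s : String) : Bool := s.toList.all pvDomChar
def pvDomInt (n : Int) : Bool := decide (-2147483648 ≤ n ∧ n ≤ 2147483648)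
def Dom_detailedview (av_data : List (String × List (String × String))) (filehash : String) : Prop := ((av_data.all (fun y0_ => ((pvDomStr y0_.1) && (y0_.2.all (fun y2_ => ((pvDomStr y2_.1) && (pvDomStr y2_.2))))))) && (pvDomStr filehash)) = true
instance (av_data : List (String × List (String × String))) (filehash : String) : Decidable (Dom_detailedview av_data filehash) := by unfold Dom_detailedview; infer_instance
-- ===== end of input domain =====

-- B replaces A's three scans over av_data by one bucketing pass plus a join (objective: alternative decomposition).
-- Equivalence is about the return value; neither program mutates its arguments.

-- first-match lookup in an inner dict (Python d[k] with the key present; "" only off Pre_)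
def pvLook : List (String × String) → String → String
  | [], _ => ""
  | (k, v) :: t, q => if k == q then v else pvLook t q

-- ===== PORT A =====
def detailedview (av_data : List (String × List (String × String))) (filehash : String) : String :=
  let vt_url := "https://www.virustotal.com/gui/file/" ++ filehash
  let response := "__VirusTotal Analysis Summary__:\n\nHash: `" ++ filehash ++ "`\n\nLink: [Click Here](" ++ vt_url ++ ")\n\n"
  -- loop 1 (under Pre_'s nodup outer keys, iterating the pairs equals Python's key iteration + lookup)
  let response := av_data.foldl (fun r p =>
    if pvLook p.2 "category" == "malicious" || pvLook p.2 "category" == "suspicious" then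
      r ++ ("❌ **" ++ pvLook p.2 "engine_name" ++ ": " ++ pvLook p.2 "result" ++ "**\n")
    else r) response
  -- loop 2
  let response := av_data.foldl (fun r p =>
    if pvLook p.2 "category" == "undetected" then
      r ++ ("✅ " ++ pvLook p.2 "engine_name" ++ ": Undetected\n")
    else r) response
  -- loop 3
  let response := av_data.foldl (fun r p =>
    if pvLook p.2 "category" == "timeout" || pvLook p.2 "category" == "type-unsupported" || pvLook p.2 "category" == "failure" then
      r ++ ("⚠ " ++ pvLook p.2 "engine_name" ++ ": Unsupported File\n")
    else r) response
  response

-- ===== PORT B =====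
def pvJoin : List String → String
  | [] => ""
  | s :: t => s ++ pvJoin t

def detailedview_alt (av_data : List (String × List (String × String))) (filehash : String) : String :=
  let buckets := av_data.foldl
    (fun (acc : List String × List String × List String) p =>
      let cat := pvLook p.2 "category"
      if cat == "malicious" || cat == "suspicious" then
        (acc.1 ++ ["❌ **" ++ pvLook p.2 "engine_name" ++ ": " ++ pvLook p.2 "result" ++ "**\n"], acc.2.1, acc.2.2)
      else if cat == "undetected" then
        (acc.1, acc.2.1 ++ ["✅ " ++ pvLook p.2 "engine_name" ++ ": Undetected\n"], acc.2.2)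
      else if cat == "timeout" || cat == "type-unsupported" || cat == "failure" then
        (acc.1, acc.2.1, acc.2.2 ++ ["⚠ " ++ pvLook p.2 "engine_name" ++ ": Unsupported File\n"])
      else acc)
    ([], [], [])
  let header := "__VirusTotal Analysis Summary__:\n\nHash: `" ++ filehash ++ "`\n\nLink: [Click Here](https://www.virustotal.com/gui/file/" ++ filehash ++ ")\n\n"
  header ++ pvJoin (buckets.1 ++ buckets.2.1 ++ buckets.2.2)

-- ===== PRECONDITION & SPEC =====
-- Pre_ excludes (a) association lists with duplicate engine keys — a Python dict cannot represent them,
-- the dict conversion collapses them, so the list-level ports cannot match — and (b) engines whose inner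
-- dict lacks a key the Python reads ('category'; 'engine_name'/'result' for the category's branch),
-- on which Python A raises KeyError.
def Pre_detailedview (av_data : List (String × List (String × String))) (filehash : String) : Prop :=
  (av_data.map Prod.fst).Nodup ∧
  ∀ p ∈ av_data,
    "category" ∈ p.2.map Prod.fst ∧
    ((p.2.lookup "category" = some "malicious" ∨ p.2.lookup "category" = some "suspicious") →
       "engine_name" ∈ p.2.map Prod.fst ∧ "result" ∈ p.2.map Prod.fst) ∧
    ((p.2.lookup "category" = some "undetected" ∨ p.2.lookup "category" = some "timeout" ∨
      p.2.lookup "category" = some "type-unsupported" ∨ p.2.lookup "category" = some "failure") →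
       "engine_name" ∈ p.2.map Prod.fst)

instance (av_data : List (String × List (String × String))) (filehash : String) : Decidable (Pre_detailedview av_data filehash) := by
  unfold Pre_detailedview; infer_instance

def pvWitness_detailedview : (List (String × List (String × String))) × String :=
  ([("Engine1", [("category", "malicious"), ("engine_name", "Engine1"), ("result", "Trojan.Gen")]),
    ("Engine2", [("category", "undetected"), ("engine_name", "Engine2")]),
    ("Engine3", [("category", "timeout"), ("engine_name", "Engine3")])], "abc123")

def Spec_detailedview (av_data : List (String × List (String × String))) (filehash : String) (out : String) : Prop := out = detailedview_alt av_data filehash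
instance (av_data : List (String × List (String × String))) (filehash : String) (out : String) : Decidable (Spec_detailedview av_data filehash out) := by unfold Spec_detailedview; infer_instance

-- ===== CLAIM (what is proved, stated in full; the proofs are below) =====
def Claim_equal_detailedview : Prop := ∀ (av_data : List (String × List (String × String))) (filehash : String), Dom_detailedview av_data filehash → Pre_detailedview av_data filehash → Spec_detailedview av_data filehash (detailedview av_data filehash)

-- ===== LEMMAS AND PROOFS =====

-- a filtered appending foldl over strings emits the join of the matching lines
theorem foldl_emit {α : Type} (c : α → Bool) (g : α → String) (l : List α) (s : String) :
    l.foldl (fun r p => if c p then r ++ g p else r) s = s ++ pvJoin ((l.filter c).map g) := by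
  induction l generalizing s with
  | nil => simp [pvJoin]
  | cons h t ih =>
    by_cases hc : c h
    · simp [List.foldl, hc, ih, pvJoin, String.append_assoc]
    · simp [List.foldl, hc, ih]

theorem emit1 (l : List (String × List (String × String))) (s : String) :
    l.foldl (fun r p =>
      if pvLook p.2 "category" == "malicious" || pvLook p.2 "category" == "suspicious" then
        r ++ ("❌ **" ++ pvLook p.2 "engine_name" ++ ": " ++ pvLook p.2 "result" ++ "**\n")
      else r) s
    = s ++ pvJoin ((l.filter (fun p => pvLook p.2 "category" == "malicious" || pvLook p.2 "category" == "suspicious")).map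
        (fun p => "❌ **" ++ pvLook p.2 "engine_name" ++ ": " ++ pvLook p.2 "result" ++ "**\n")) :=
  foldl_emit _ _ l s

theorem emit2 (l : List (String × List (String × String))) (s : String) :
    l.foldl (fun r p =>
      if pvLook p.2 "category" == "undetected" then
        r ++ ("✅ " ++ pvLook p.2 "engine_name" ++ ": Undetected\n")
      else r) s
    = s ++ pvJoin ((l.filter (fun p => pvLook p.2 "category" == "undetected")).map
        (fun p => "✅ " ++ pvLook p.2 "engine_name" ++ ": Undetected\n")) :=
  foldl_emit _ _ l s

theorem emit3 (l : List (String × List (String × String))) (s : String) :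
    l.foldl (fun r p =>
      if pvLook p.2 "category" == "timeout" || pvLook p.2 "category" == "type-unsupported" || pvLook p.2 "category" == "failure" then
        r ++ ("⚠ " ++ pvLook p.2 "engine_name" ++ ": Unsupported File\n")
      else r) s
    = s ++ pvJoin ((l.filter (fun p => pvLook p.2 "category" == "timeout" || pvLook p.2 "category" == "type-unsupported" || pvLook p.2 "category" == "failure")).map
        (fun p => "⚠ " ++ pvLook p.2 "engine_name" ++ ": Unsupported File\n")) :=
  foldl_emit _ _ l s

-- B's bucketing foldl computes the three filtered/mapped lists (categories are mutually exclusive strings)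
theorem foldl_buckets (l : List (String × List (String × String)))
    (m u n : List String) :
    l.foldl
      (fun (acc : List String × List String × List String) p =>
        let cat := pvLook p.2 "category"
        if cat == "malicious" || cat == "suspicious" then
          (acc.1 ++ ["❌ **" ++ pvLook p.2 "engine_name" ++ ": " ++ pvLook p.2 "result" ++ "**\n"], acc.2.1, acc.2.2)
        else if cat == "undetected" then
          (acc.1, acc.2.1 ++ ["✅ " ++ pvLook p.2 "engine_name" ++ ": Undetected\n"], acc.2.2)
        else if cat == "timeout" || cat == "type-unsupported" || cat == "failure" then
          (acc.1, acc.2.1, acc.2.2 ++ ["⚠ " ++ pvLook p.2 "engine_name" ++ ": Unsupported File\n"])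
        else acc)
      (m, u, n)
    = (m ++ (l.filter (fun p => pvLook p.2 "category" == "malicious" || pvLook p.2 "category" == "suspicious")).map
          (fun p => "❌ **" ++ pvLook p.2 "engine_name" ++ ": " ++ pvLook p.2 "result" ++ "**\n"),
       u ++ (l.filter (fun p => pvLook p.2 "category" == "undetected")).map
          (fun p => "✅ " ++ pvLook p.2 "engine_name" ++ ": Undetected\n"),
       n ++ (l.filter (fun p => pvLook p.2 "category" == "timeout" || pvLook p.2 "category" == "type-unsupported" || pvLook p.2 "category" == "failure")).map
          (fun p => "⚠ " ++ pvLook p.2 "engine_name" ++ ": Unsupported File\n")) := by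
  induction l generalizing m u n with
  | nil => simp
  | cons h t ih =>
    by_cases h1 : (pvLook h.2 "category" == "malicious" || pvLook h.2 "category" == "suspicious") = true
    · have h2 : (pvLook h.2 "category" == "undetected") = false := by
        rcases Bool.or_eq_true_iff.mp h1 with hc | hc <;> simp [eq_of_beq hc]
      have h3 : (pvLook h.2 "category" == "timeout" || pvLook h.2 "category" == "type-unsupported" || pvLook h.2 "category" == "failure") = false := by
        rcases Bool.or_eq_true_iff.mp h1 with hc | hc <;> simp [eq_of_beq hc]
      simp only [List.foldl, h1, if_true, ih, List.filter, h2, h3, List.map, Bool.false_eq_true,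
        if_false]
      simp
    · have h1' : (pvLook h.2 "category" == "malicious" || pvLook h.2 "category" == "suspicious") = false := by
        simpa using h1
      by_cases h2 : (pvLook h.2 "category" == "undetected") = true
      · have h3 : (pvLook h.2 "category" == "timeout" || pvLook h.2 "category" == "type-unsupported" || pvLook h.2 "category" == "failure") = false := by
          simp [eq_of_beq h2]
        simp only [List.foldl, h1', h2, h3, if_true, Bool.false_eq_true, if_false, ih,
          List.filter, List.map]
        simp
      · have h2' : (pvLook h.2 "category" == "undetected") = false := by simpa using h2
        by_cases h3 : (pvLook h.2 "category" == "timeout" || pvLook h.2 "category" == "type-unsupported" || pvLook h.2 "category" == "failure") = true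
        · simp only [List.foldl, h1', h2', h3, if_true, Bool.false_eq_true, if_false, ih,
            List.filter, List.map]
          simp
        · have h3' : (pvLook h.2 "category" == "timeout" || pvLook h.2 "category" == "type-unsupported" || pvLook h.2 "category" == "failure") = false := by
            simpa using h3
          simp only [List.foldl, h1', h2', h3', Bool.false_eq_true, if_false, ih, List.filter]

theorem pvJoin_append (a b : List String) : pvJoin (a ++ b) = pvJoin a ++ pvJoin b := by
  induction a with
  | nil => simp [pvJoin]
  | cons h t ih => simp [pvJoin, ih, String.append_assoc]

-- ===== VERDICT (by name: the statement is the Claim_ definition above) =====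
theorem detailedview_spec : Claim_equal_detailedview := by
  intro av_data filehash _ _
  unfold Spec_detailedview detailedview detailedview_alt
  rw [foldl_buckets]
  simp only [emit1, emit2, emit3]
  simp [pvJoin_append, String.append_assoc]
  rw [← String.append_assoc]
  congr 1
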